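-- pv_equiv track=rewrite | github.com/Seif-Mamdouh/Master-the-Coding-Interview | Compainies Interview/HRT/Summer2022/task2.py | solution
-- ===== SOURCE A (Python) =====
-- def solution(S):
--     #total count of 'a'
--     count = 0
--
--
--     for c in S:
--         if c == 'a':
--             # increment by 1 if is c = a
--             count += 1
--
--     #if total count of 'a' is not divisible by 3 return 0
--     if(count%3 != 0):
--         return 0
--
--     res = 0
--     k = count // 3
--     sum = 0
--
--     #initialize map
--     mp = {}
--
--     #traverse through the string to find ways to split the string
--     for i in range(len(S)):
--         #increment count if 'a' appears
--         if(S[i] == 'a'):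
--             sum += 1
--
--         #increment result in sum = 2k & k exists in map
--         if(sum == 2*k and k in mp and i<len(S)-1 and i > 0):
--             res += mp[k]
--
--         #insert sum in a map
--         if(sum in mp):
--             mp[sum] += 1
--         else:
--             mp[sum] = 1
--     #final result
--     return res
-- ===== SOURCE B (Python) =====
-- def solution(S):
--     n = len(S)
--     total = sum(c == 'a' for c in S)
--     if total % 3 != 0:
--         return 0
--     if total == 0:
--         return (n - 1) * (n - 2) // 2 if n >= 2 else 0
--     k = total // 3
--     seen = 0
--     w1 = 0
--     w2 = 0
--     for c in S:
--         if c == 'a':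
--             seen += 1
--         elif seen == k:
--             w1 += 1
--         elif seen == 2 * k:
--             w2 += 1
--     return (w1 + 1) * (w2 + 1)
-- ===== Notes on version B (the rewrite author's own statement) =====
-- stated objective: alternative
-- what changed: A's second pass keeps a hash map from every running prefix-count to its multiplicity and accumulates res from map lookups; B counts the 'a's, handles the zero-'a' case with the closed form (n-1)(n-2)//2, and otherwise makes one plain scan keeping just two gap counters (non-'a' positions at prefix level k and 2k), returning (w1+1)*(w2+1).
import Mathlib
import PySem

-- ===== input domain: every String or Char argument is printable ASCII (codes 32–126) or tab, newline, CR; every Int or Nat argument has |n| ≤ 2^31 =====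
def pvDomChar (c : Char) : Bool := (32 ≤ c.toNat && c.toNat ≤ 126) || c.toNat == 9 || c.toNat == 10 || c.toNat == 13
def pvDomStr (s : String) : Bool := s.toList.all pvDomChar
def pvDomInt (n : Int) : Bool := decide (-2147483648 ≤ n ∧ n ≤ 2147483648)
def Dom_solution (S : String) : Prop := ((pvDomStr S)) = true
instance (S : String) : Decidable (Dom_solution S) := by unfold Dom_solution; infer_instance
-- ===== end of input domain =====

-- B replaces A's prefix-sum/hash-map accumulation by a single scan with two gap counters and a closed product.

-- ===== PORT A =====
-- loop body of A's `for i in range(len(S))`: state (sum, mp, res); the index/char pairs come from enumerate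
def aStep (k n : Int) (st : Int × PySem.Dict Int Int × Int) (p : Int × Char) : Int × PySem.Dict Int Int × Int :=
  let sum := if p.2 == 'a' then st.1 + 1 else st.1
  let res := if sum = 2 * k ∧ (st.2.1.contains k) = true ∧ p.1 < n - 1 ∧ p.1 > 0
             then st.2.2 + st.2.1.getD k 0 else st.2.2
  let mp := if st.2.1.contains sum then st.2.1.modify sum 0 (· + 1) else st.2.1.insert sum 1
  (sum, mp, res)

def solution (S : String) : Int :=
  let cs := S.toList
  let count : Int := cs.foldl (fun c ch => if ch == 'a' then c + 1 else c) 0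
  if PySem.Int.mod count 3 ≠ 0 then 0
  else
    let k := PySem.Int.floordiv count 3
    let n : Int := PySem.Str.len S
    let st := (PySem.List.enumerate cs).foldl (aStep k n) (0, PySem.Dict.empty, 0)
    st.2.2

-- ===== PORT B =====
-- loop body of B's single scan: state (seen, w1, w2)
def bStep (k : Int) (st : Int × Int × Int) (c : Char) : Int × Int × Int :=
  if c == 'a' then (st.1 + 1, st.2.1, st.2.2)
  else if st.1 = k then (st.1, st.2.1 + 1, st.2.2)
  else if st.1 = 2 * k then (st.1, st.2.1, st.2.2 + 1)
  else st

def solution_alt (S : String) : Int :=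
  let cs := S.toList
  let n : Int := PySem.Str.len S
  let total : Int := cs.foldl (fun acc c => acc + (if c == 'a' then 1 else 0)) 0
  if PySem.Int.mod total 3 ≠ 0 then 0
  else if total = 0 then (if 2 ≤ n then PySem.Int.floordiv ((n - 1) * (n - 2)) 2 else 0)
  else
    let k := PySem.Int.floordiv total 3
    let st := cs.foldl (bStep k) (0, 0, 0)
    (st.2.1 + 1) * (st.2.2 + 1)

-- ===== PRECONDITION & SPEC =====
def Spec_solution (S : String) (out : Int) : Prop := out = solution_alt S
instance (S : String) (out : Int) : Decidable (Spec_solution S out) := by unfold Spec_solution; infer_instance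

-- ===== CLAIM (what is proved, stated in full; the proofs are below) =====
def Claim_equal_solution : Prop := ∀ (S : String), Dom_solution S → Spec_solution S (solution S)

-- ===== LEMMAS AND PROOFS =====

-- prefix count of 'a' in the first i characters
def pc (cs : List Char) (i : Nat) : Nat := (cs.take i).count 'a'

-- the list of prefix counts seen by A's loop (value after processing index i)
def prefs (cs : List Char) : List Int := (List.range cs.length).map (fun i => (pc cs (i + 1) : Int))

-- the contribution A's loop adds to res at index i
def Rterm (cs : List Char) (k n : Int) (i : Nat) : Int :=
  if (pc cs (i + 1) : Int) = 2 * k ∧ (((prefs cs).take i).contains k) = true ∧ (i : Int) < n - 1 ∧ (i : Int) > 0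
  then (((prefs cs).take i).count k : Int) else 0

def Rval (cs : List Char) (k n : Int) : Int := ((List.range cs.length).map (Rterm cs k n)).sum

-- number of indices i whose prefix count after step i is v
def cntN (cs : List Char) (v : Nat) : Nat :=
  (List.range cs.length).countP (fun i => pc cs (i + 1) = v)

-- number of non-'a' indices i whose running count equals v (what B's w-counters count)
def wN (cs : List Char) (v : Nat) : Nat :=
  (List.range cs.length).countP (fun i => pc cs (i + 1) = pc cs i ∧ pc cs i = v)

lemma length_prefs (cs : List Char) : (prefs cs).length = cs.length := by
  simp [prefs]

lemma pc_zero (cs : List Char) : pc cs 0 = 0 := by simp [pc]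

lemma pc_len (cs : List Char) : pc cs cs.length = cs.count 'a' := by simp [pc]

lemma pc_append_le (xs : List Char) (x : Char) (i : Nat) (h : i ≤ xs.length) :
    pc (xs ++ [x]) i = pc xs i := by
  simp [pc, List.take_append_of_le_length h]

lemma pc_mono (cs : List Char) {i j : Nat} (h : i ≤ j) : pc cs i ≤ pc cs j := by
  have h1 : cs.take i = (cs.take j).take i := by rw [List.take_take, Nat.min_eq_left h]
  calc pc cs i = ((cs.take j).take i).count 'a' := by rw [pc, h1]
    _ ≤ (cs.take j).count 'a' := List.Sublist.count_le _ (List.take_sublist _ _)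
    _ = pc cs j := rfl

lemma pc_step (cs : List Char) (i : Nat) :
    pc cs (i + 1) = pc cs i ∨ pc cs (i + 1) = pc cs i + 1 := by
  rcases Nat.lt_or_ge i cs.length with h | h
  · have ht : cs.take (i + 1) = cs.take i ++ (some cs[i]).toList := by
      rw [List.take_add_one, List.getElem?_eq_getElem h]
    by_cases hx : cs[i] = 'a'
    · right
      rw [pc, pc, ht, List.count_append]
      simp [hx]
    · left
      rw [pc, pc, ht, List.count_append]
      simp [hx]
  · left
    rw [pc, pc, List.take_of_length_le h, List.take_of_length_le (by omega)]

-- first crossing: the prefix count attains v together with v-1 just before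
lemma pc_cross (cs : List Char) (v : Nat) (m : Nat) (hv : 1 ≤ v) (h : v ≤ pc cs m) :
    ∃ i < m, pc cs i = v - 1 ∧ pc cs (i + 1) = v := by
  induction m with
  | zero => rw [pc_zero] at h; omega
  | succ m ih =>
    by_cases hm : v ≤ pc cs m
    · obtain ⟨i, hi, h1, h2⟩ := ih hm
      exact ⟨i, Nat.lt_succ_of_lt hi, h1, h2⟩
    · have hm' : pc cs m < v := by omega
      rcases pc_step cs m with hs | hs
      · exact absurd h (by omega)
      · exact ⟨m, Nat.lt_succ_self m, by omega, by omega⟩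

lemma prefs_append (xs : List Char) (x : Char) :
    prefs (xs ++ [x]) = prefs xs ++ [(pc (xs ++ [x]) (xs.length + 1) : Int)] := by
  simp only [prefs, List.length_append, List.length_cons, List.length_nil, Nat.zero_add,
    List.range_succ, List.map_append, List.map_cons, List.map_nil]
  congr 1
  exact List.map_congr_left fun i hi => by
    rw [pc_append_le xs x (i + 1) (Nat.succ_le_of_lt (List.mem_range.mp hi))]

lemma prefs_take (cs : List Char) (i : Nat) (h : i ≤ cs.length) :
    (prefs cs).take i = (List.range i).map (fun j => (pc cs (j + 1) : Int)) := by
  simp only [prefs, ← List.map_take, List.take_range, Nat.min_eq_left h]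

-- ----- A's loop -----

lemma enumerate_append_singleton (xs : List Char) (x : Char) :
    PySem.List.enumerate (xs ++ [x]) = PySem.List.enumerate xs ++ [((xs.length : Int), x)] := by
  rw [PySem.List.enumerate_append]
  simp [PySem.List.enumerate_cons, PySem.List.enumerate_nil]

lemma dict_branch (d : PySem.Dict Int Int) (s : Int) :
    (if d.contains s then d.modify s 0 (· + 1) else d.insert s 1) = d.modify s 0 (· + 1) := by
  by_cases h : d.contains s = true
  · simp [h]
  · have h' : d.contains s = false := by simpa using h
    simp [h', PySem.Dict.modify, PySem.Dict.getD_of_not_contains]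

lemma Rterm_append (xs : List Char) (x : Char) (k n : Int) (i : Nat) (h : i < xs.length) :
    Rterm (xs ++ [x]) k n i = Rterm xs k n i := by
  unfold Rterm
  rw [pc_append_le xs x (i + 1) (by omega), prefs_append,
    List.take_append_of_le_length (by rw [length_prefs]; omega)]

lemma Rval_append (xs : List Char) (x : Char) (k n : Int) :
    Rval (xs ++ [x]) k n = Rval xs k n + Rterm (xs ++ [x]) k n xs.length := by
  unfold Rval
  have hl : (xs ++ [x]).length = xs.length + 1 := by simp
  rw [hl, List.range_succ, List.map_append, List.sum_append]
  simp only [List.map_cons, List.map_nil, List.sum_cons, List.sum_nil, add_zero]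
  congr 1
  exact congrArg List.sum (List.map_congr_left fun i hi =>
    Rterm_append xs x k n i (List.mem_range.mp hi))

lemma aloop_eq (cs : List Char) (k n : Int) :
    (PySem.List.enumerate cs).foldl (aStep k n) (0, PySem.Dict.empty, 0)
      = ((cs.count 'a' : Int), PySem.Dict.counter (prefs cs), Rval cs k n) := by
  induction cs using List.reverseRecOn with
  | nil => rfl
  | append_singleton xs x ih =>
    rw [enumerate_append_singleton, List.foldl_append, ih]
    simp only [List.foldl_cons, List.foldl_nil]
    have hpc : pc (xs ++ [x]) (xs.length + 1) = (xs ++ [x]).count 'a' := by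
      have h := pc_len (xs ++ [x])
      simpa using h
    have hsum : (if (x == 'a') = true then ((xs.count 'a' : Nat) : Int) + 1 else ((xs.count 'a' : Nat) : Int))
        = (((xs ++ [x]).count 'a' : Nat) : Int) := by
      by_cases hx : x = 'a' <;> simp [hx, List.count_append]
    have hpf : prefs (xs ++ [x]) = prefs xs ++ [(((xs ++ [x]).count 'a' : Nat) : Int)] := by
      rw [prefs_append, hpc]
    have htake : (prefs (xs ++ [x])).take xs.length = prefs xs := by
      conv_lhs => rw [hpf, ← length_prefs xs]
      exact List.take_left
    unfold aStep
    simp only [hsum]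
    refine Prod.ext rfl (Prod.ext ?_ ?_)
    · show (if (PySem.Dict.counter (prefs xs)).contains (((xs ++ [x]).count 'a' : Nat) : Int) = true
          then (PySem.Dict.counter (prefs xs)).modify (((xs ++ [x]).count 'a' : Nat) : Int) 0 (· + 1)
          else (PySem.Dict.counter (prefs xs)).insert (((xs ++ [x]).count 'a' : Nat) : Int) 1)
        = PySem.Dict.counter (prefs (xs ++ [x]))
      rw [dict_branch, hpf, PySem.Dict.counter_append_singleton]
    · show (if (((xs ++ [x]).count 'a' : Nat) : Int) = 2 * k
            ∧ ((PySem.Dict.counter (prefs xs)).contains k) = true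
            ∧ ((xs.length : Nat) : Int) < n - 1 ∧ ((xs.length : Nat) : Int) > 0
          then Rval xs k n + (PySem.Dict.counter (prefs xs)).getD k 0 else Rval xs k n)
        = Rval (xs ++ [x]) k n
      rw [Rval_append]
      unfold Rterm
      rw [hpc, htake, PySem.Dict.contains_counter, PySem.Dict.getD_counter]
      split
      · rfl
      · exact (add_zero _).symm

-- ----- B's loop -----

lemma countP_range_succ (n : Nat) (p : Nat → Bool) :
    (List.range (n + 1)).countP p = (List.range n).countP p + (if p n then 1 else 0) := by
  rw [List.range_succ, List.countP_append]
  simp [List.countP_cons]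

lemma bloop_eq (cs : List Char) (k : Int) (hk : 1 ≤ k) :
    cs.foldl (bStep k) (0, 0, 0)
      = ((cs.count 'a' : Int),
         ((List.range cs.length).countP (fun i => pc cs (i + 1) = pc cs i ∧ (pc cs i : Int) = k) : Int),
         ((List.range cs.length).countP (fun i => pc cs (i + 1) = pc cs i ∧ (pc cs i : Int) = 2 * k) : Int)) := by
  induction cs using List.reverseRecOn with
  | nil => rfl
  | append_singleton xs x ih =>
    rw [List.foldl_append, ih]
    simp only [List.foldl_cons, List.foldl_nil]
    have hL : (xs ++ [x]).length = xs.length + 1 := by simp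
    have hpcl : pc (xs ++ [x]) (xs.length + 1) = (xs ++ [x]).count 'a' := by
      have h := pc_len (xs ++ [x]); simpa using h
    have hpl : pc (xs ++ [x]) xs.length = xs.count 'a' := by
      rw [pc_append_le xs x xs.length le_rfl, pc_len]
    have hcong : ∀ v : Int, (List.range xs.length).countP
          (fun i => pc (xs ++ [x]) (i + 1) = pc (xs ++ [x]) i ∧ (pc (xs ++ [x]) i : Int) = v)
        = (List.range xs.length).countP (fun i => pc xs (i + 1) = pc xs i ∧ (pc xs i : Int) = v) := by
      intro v
      apply List.countP_congr
      intro i hi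
      have h1 := pc_append_le xs x (i + 1) (Nat.succ_le_of_lt (List.mem_range.mp hi))
      have h2 := pc_append_le xs x i (Nat.le_of_lt (List.mem_range.mp hi))
      simp [h1, h2]
    rw [hL]
    rw [countP_range_succ, countP_range_succ, hcong k, hcong (2 * k)]
    have hknot : ¬ ((k : Int) = 2 * k) := by omega
    have hknot2 : ¬ ((2 * k : Int) = k) := by omega
    by_cases hx : x = 'a'
    · subst hx
      have hcnt : (xs ++ ['a']).count 'a' = xs.count 'a' + 1 := by
        simp [List.count_append]
      have hnew : ¬ (pc (xs ++ ['a']) (xs.length + 1) = pc (xs ++ ['a']) xs.length) := by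
        rw [hpcl, hpl, hcnt]; omega
      have hnew' : ¬ (pc (xs ++ ['a']) (1 + xs.length) = pc (xs ++ ['a']) xs.length) := by
        rw [Nat.add_comm]; exact hnew
      unfold bStep
      simp [hnew, hcnt]
    · have hcnt : (xs ++ [x]).count 'a' = xs.count 'a' := by
        simp [List.count_append, hx]
      have hnew : pc (xs ++ [x]) (xs.length + 1) = pc (xs ++ [x]) xs.length := by
        rw [hpcl, hpl, hcnt]
      unfold bStep
      have hxb : (x == 'a') = false := by simp [hx]
      by_cases hk1 : ((xs.count 'a' : Nat) : Int) = k
      · have hk2 : ¬ (((xs.count 'a' : Nat) : Int) = 2 * k) := by omega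
        simp [hxb, hk1, hnew, hpl, hcnt, hknot]
      · by_cases hk2 : ((xs.count 'a' : Nat) : Int) = 2 * k
        · simp [hxb, hk2, hnew, hpl, hcnt, hknot2]
        · simp [hxb, hk1, hk2, hnew, hpl, hcnt]

-- ----- counting identities -----

lemma countP_eq_one_of_unique {l : List Nat} {p : Nat → Bool} (hnd : l.Nodup)
    (i : Nat) (hi : i ∈ l) (hpi : p i = true) (huniq : ∀ j ∈ l, p j = true → j = i) :
    l.countP p = 1 := by
  induction l with
  | nil => simp at hi
  | cons a l ih =>
    rw [List.countP_cons]
    rcases List.mem_cons.mp hi with rfl | hmem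
    · have h0 : l.countP p = 0 := by
        rw [List.countP_eq_zero]
        intro j hj hpj
        have hj' := huniq j (List.mem_cons_of_mem _ hj) hpj
        subst hj'
        exact absurd hj (List.nodup_cons.mp hnd).1
      simp [h0, hpi]
    · have ha : p a = false := by
        by_contra hpa
        have hpa' : p a = true := by simpa using hpa
        have haa := huniq a List.mem_cons_self hpa'
        subst haa
        exact absurd hmem (List.nodup_cons.mp hnd).1
      rw [ha]
      have := ih (List.nodup_cons.mp hnd).2 hmem
        (fun j hj hpj => huniq j (List.mem_cons_of_mem _ hj) hpj)
      simpa using this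

-- exactly one index is the v-th 'a'
lemma cnt_hit_one (cs : List Char) (v : Nat) (hv : 1 ≤ v) (hvt : v ≤ cs.count 'a') :
    (List.range cs.length).countP
      (fun i => pc cs (i + 1) = pc cs i + 1 ∧ pc cs (i + 1) = v) = 1 := by
  obtain ⟨i0, hi0, h1, h2⟩ := pc_cross cs v cs.length hv (by rw [pc_len]; exact hvt)
  apply countP_eq_one_of_unique List.nodup_range i0 (List.mem_range.mpr hi0)
  · simp only [decide_eq_true_eq]
    omega
  · intro j hj hpj
    simp only [decide_eq_true_eq] at hpj
    obtain ⟨hj1, hj2⟩ := hpj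
    rcases Nat.lt_trichotomy j i0 with h | h | h
    · have := pc_mono cs (show j + 1 ≤ i0 by omega)
      omega
    · exact h
    · have := pc_mono cs (show i0 + 1 ≤ j by omega)
      omega

lemma countP_split (l : List Nat) (p q : Nat → Bool) :
    l.countP p = l.countP (fun i => p i && q i) + l.countP (fun i => p i && !q i) := by
  induction l with
  | nil => simp
  | cons a l ih =>
    simp only [List.countP_cons, ih]
    cases hpa : p a <;> cases hqa : q a <;> simp <;> omega

lemma cntN_eq_w_add_one (cs : List Char) (v : Nat) (hv : 1 ≤ v) (hvt : v ≤ cs.count 'a') :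
    cntN cs v = wN cs v + 1 := by
  unfold cntN wN
  rw [countP_split (List.range cs.length) _ (fun i => decide (pc cs (i + 1) = pc cs i))]
  have e1 : (List.range cs.length).countP
        (fun i => decide (pc cs (i + 1) = v) && decide (pc cs (i + 1) = pc cs i))
      = (List.range cs.length).countP (fun i => pc cs (i + 1) = pc cs i ∧ pc cs i = v) := by
    apply List.countP_congr
    intro i _
    simp only [Bool.and_eq_true, decide_eq_true_eq]
    omega
  have e2 : (List.range cs.length).countP
        (fun i => decide (pc cs (i + 1) = v) && !decide (pc cs (i + 1) = pc cs i))
      = (List.range cs.length).countP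
        (fun i => pc cs (i + 1) = pc cs i + 1 ∧ pc cs (i + 1) = v) := by
    apply List.countP_congr
    intro i _
    have hstep := pc_step cs i
    simp only [Bool.and_eq_true, Bool.not_eq_eq_eq_not, Bool.not_true, decide_eq_true_eq,
      decide_eq_false_iff_not]
    constructor
    · rintro ⟨h1, h2⟩
      rcases hstep with h | h
      · exact absurd h h2
      · exact ⟨h, h1⟩
    · rintro ⟨h1, h2⟩
      exact ⟨h2, by omega⟩
  rw [e1, e2, cnt_hit_one cs v hv hvt]

lemma sum_map_ite_const (l : List Nat) (p : Nat → Prop) [DecidablePred p] (C : Int) :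
    ((l.map (fun i => if p i then C else 0)).sum) = (l.countP (fun i => decide (p i)) : Int) * C := by
  induction l with
  | nil => simp
  | cons a l ih =>
    simp only [List.map_cons, List.sum_cons, ih, List.countP_cons]
    by_cases h : p a <;> simp [h] <;> ring

lemma rval_eq_prod (cs : List Char) (m : Nat) (hm : 1 ≤ m) (ht : cs.count 'a' = 3 * m) :
    Rval cs (m : Int) (cs.length : Int) = (cntN cs (2 * m) : Int) * (cntN cs m : Int) := by
  unfold Rval
  have key : ∀ i ∈ List.range cs.length,
      Rterm cs (m : Int) (cs.length : Int) i
        = (if pc cs (i + 1) = 2 * m then (cntN cs m : Int) else 0) := by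
    intro i hi
    have hilen : i < cs.length := List.mem_range.mp hi
    by_cases hp : pc cs (i + 1) = 2 * m
    · have hstep : pc cs (i + 1) = pc cs i ∨ pc cs (i + 1) = pc cs i + 1 := pc_step cs i
      have hge : m ≤ pc cs i := by omega
      obtain ⟨j, hj, hj1, hj2⟩ := pc_cross cs m i hm hge
      have hcont : ((prefs cs).take i).contains ((m : Nat) : Int) = true := by
        rw [prefs_take cs i (Nat.le_of_lt hilen)]
        rw [List.contains_iff_mem]
        exact List.mem_map.mpr ⟨j, List.mem_range.mpr (by omega), by rw [hj2]⟩
      have hlt : (i : Int) < (cs.length : Int) - 1 := by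
        have hne : i + 1 ≠ cs.length := by
          intro he
          have hplen := pc_len cs
          rw [← he] at hplen
          omega
        have : i + 1 < cs.length := by omega
        omega
      have hpos : (i : Int) > 0 := by
        have : i ≠ 0 := by
          intro he
          subst he
          have h0 := pc_zero cs
          omega
        omega
      have hcount : (((prefs cs).take i).count ((m : Nat) : Int) : Int) = (cntN cs m : Int) := by
        rw [prefs_take cs i (Nat.le_of_lt hilen)]
        rw [List.count_eq_countP, List.countP_map]
        have hin : (List.range i).countP ((fun (z : Int) => z == (m : Int)) ∘ (fun j => ((pc cs (j + 1) : Nat) : Int)))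
            = (List.range i).countP (fun j => pc cs (j + 1) = m) := by
          apply List.countP_congr
          intro j _
          simp
        rw [hin]
        have hext : (List.range cs.length).countP (fun j => pc cs (j + 1) = m)
            = (List.range i).countP (fun j => pc cs (j + 1) = m) := by
          conv_lhs => rw [show cs.length = i + (cs.length - i) from by omega, List.range_add]
          rw [List.countP_append]
          have hz : ((List.range (cs.length - i)).map (fun z => i + z)).countP
              (fun j => pc cs (j + 1) = m) = 0 := by
            rw [List.countP_eq_zero]
            intro j hjmem
            obtain ⟨z, hz1, rfl⟩ := List.mem_map.mp hjmem
            have := pc_mono cs (show i + 1 ≤ i + z + 1 by omega)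
            simp only [decide_eq_true_eq]
            omega
          rw [hz, add_zero]
        unfold cntN
        rw [hext]
      unfold Rterm
      rw [if_pos ⟨by exact_mod_cast congrArg (Nat.cast : Nat → Int) hp, hcont, hlt, hpos⟩, if_pos hp]
      exact hcount
    · unfold Rterm
      rw [if_neg, if_neg hp]
      intro hc
      exact hp (by exact_mod_cast hc.1)
  rw [congrArg List.sum (List.map_congr_left key)]
  rw [sum_map_ite_const]
  rfl

lemma rval_zero (cs : List Char) (ht : cs.count 'a' = 0) :
    Rval cs 0 (cs.length : Int)
      = (if 2 ≤ (cs.length : Int) then PySem.Int.floordiv (((cs.length : Int) - 1) * ((cs.length : Int) - 2)) 2 else 0) := by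
  have hall : ∀ i, pc cs i = 0 := by
    intro i
    have := List.Sublist.count_le 'a' (List.take_sublist i cs)
    unfold pc
    omega
  have key : ∀ i ∈ List.range cs.length,
      Rterm cs 0 (cs.length : Int) i
        = (if 1 ≤ i ∧ (i : Int) < (cs.length : Int) - 1 then (i : Int) else 0) := by
    intro i hi
    have hilen := List.mem_range.mp hi
    unfold Rterm
    have htk : (prefs cs).take i = (List.range i).map (fun _ => (0 : Int)) := by
      rw [prefs_take cs i (Nat.le_of_lt hilen)]
      exact List.map_congr_left fun j _ => by rw [hall (j + 1)]; simp
    rw [htk, hall (i + 1)]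
    by_cases hig : 1 ≤ i ∧ (i : Int) < (cs.length : Int) - 1
    · rw [if_pos, if_pos hig]
      · rw [List.count_eq_countP, List.countP_map]
        simp [Function.comp_def, List.countP_true]
      · refine ⟨by simp, ?_, hig.2, by exact_mod_cast hig.1⟩
        rw [List.contains_iff_mem]
        exact List.mem_map.mpr ⟨0, List.mem_range.mpr (by omega), rfl⟩
    · rw [if_neg, if_neg hig]
      intro hc
      apply hig
      refine ⟨?_, hc.2.2.1⟩
      have := hc.2.2.2
      omega
  unfold Rval
  rw [congrArg List.sum (List.map_congr_left key)]
  have hfin : ((List.range cs.length).map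
        (fun (j : Nat) => if 1 ≤ j ∧ (j : Int) < (cs.length : Int) - 1 then (j : Int) else 0)).sum
      = ∑ j ∈ Finset.range cs.length,
          (fun (j : Nat) => if 1 ≤ j ∧ (j : Int) < (cs.length : Int) - 1 then (j : Int) else 0) j := rfl
  rw [hfin]
  by_cases h2 : 2 ≤ cs.length
  · rw [if_pos (by exact_mod_cast h2)]
    rw [← Finset.sum_filter]
    have hfilter : (Finset.range cs.length).filter
          (fun (j : Nat) => 1 ≤ j ∧ (j : Int) < (cs.length : Int) - 1)
        = Finset.Ico 1 (cs.length - 1) := by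
      ext j
      simp only [Finset.mem_filter, Finset.mem_range, Finset.mem_Ico]
      constructor
      · rintro ⟨hj, hj1, hj2⟩
        omega
      · rintro ⟨hj1, hj2⟩
        refine ⟨by omega, hj1, by omega⟩
    rw [hfilter]
    rw [← Nat.cast_sum]
    have hgauss : ∑ j ∈ Finset.Ico 1 (cs.length - 1), j = (cs.length - 1) * (cs.length - 2) / 2 := by
      have hsplit : ∑ j ∈ Finset.Ico 0 (cs.length - 1), j
          = (∑ j ∈ Finset.Ico 0 1, j) + ∑ j ∈ Finset.Ico 1 (cs.length - 1), j := by
        rw [Finset.sum_Ico_consecutive]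
        · omega
        · omega
      have hrange : ∑ j ∈ Finset.Ico 0 (cs.length - 1), j = ∑ j ∈ Finset.range (cs.length - 1), j := by
        rw [Finset.range_eq_Ico]
      rw [hrange, Finset.sum_range_id] at hsplit
      have h01 : ∑ j ∈ Finset.Ico 0 1, j = 0 := by decide
      rw [h01] at hsplit
      have hfix : cs.length - 1 - 1 = cs.length - 2 := by omega
      rw [hfix] at hsplit
      omega
    rw [hgauss]
    rw [PySem.Int.floordiv_eq_ediv_of_pos (by norm_num)]
    have hc1 : ((cs.length : Int) - 1) = (((cs.length - 1 : Nat) : Nat) : Int) := by omega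
    have hc2 : ((cs.length : Int) - 2) = (((cs.length - 2 : Nat) : Nat) : Int) := by omega
    rw [hc1, hc2, ← Nat.cast_mul]
    omega
  · rw [if_neg (by omega)]
    apply Finset.sum_eq_zero
    intro i hi
    rw [if_neg]
    rintro ⟨h1, hlt⟩
    have := Finset.mem_range.mp hi
    omega

-- ===== VERDICT (by name: the statement is the Claim_ definition above) =====
theorem solution_spec : Claim_equal_solution := by
  intro S _
  show solution S = solution_alt S
  unfold solution solution_alt
  simp only [PySem.List.foldl_beq_add_one, PySem.List.foldl_add,
    PySem.List.sum_map_ite_one_zero, zero_add, PySem.Str.len_eq]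
  rw [← List.count_eq_countP]
  set cs := S.toList with hcs
  set t : Nat := cs.count 'a' with htdef
  have hmod : PySem.Int.mod (t : Int) 3 = ((t % 3 : Nat) : Int) := by
    rw [PySem.Int.mod_eq_emod_of_pos (by norm_num)]
    omega
  by_cases h3 : t % 3 = 0
  · rw [if_neg (by rw [hmod]; omega), if_neg (by rw [hmod]; omega)]
    set m : Nat := t / 3 with hmdef
    have htm : t = 3 * m := by omega
    have hk : PySem.Int.floordiv (t : Int) 3 = (m : Int) := by
      rw [PySem.Int.floordiv_eq_ediv_of_pos (by norm_num)]
      omega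
    by_cases hm0 : m = 0
    · have ht0 : t = 0 := by omega
      rw [if_pos (by exact_mod_cast ht0)]
      rw [hk, hm0, aloop_eq]
      dsimp only
      exact_mod_cast rval_zero cs (by rw [← htdef]; exact ht0)
    · have hm1 : 1 ≤ m := by omega
      rw [if_neg (by exact_mod_cast show ¬ t = 0 by omega)]
      rw [hk, aloop_eq, bloop_eq cs (m : Int) (by exact_mod_cast hm1)]
      dsimp only
      rw [rval_eq_prod cs m hm1 (by omega)]
      have hw1 : (List.range cs.length).countP
            (fun i => pc cs (i + 1) = pc cs i ∧ (pc cs i : Int) = (m : Int)) = wN cs m := by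
        unfold wN
        apply List.countP_congr
        intro i _
        simp only [decide_eq_true_eq]
        constructor
        · rintro ⟨h1, h2⟩
          exact ⟨h1, by exact_mod_cast h2⟩
        · rintro ⟨h1, h2⟩
          exact ⟨h1, by exact_mod_cast congrArg (Nat.cast : Nat → Int) h2⟩
      have hw2 : (List.range cs.length).countP
            (fun i => pc cs (i + 1) = pc cs i ∧ (pc cs i : Int) = 2 * (m : Int)) = wN cs (2 * m) := by
        unfold wN
        apply List.countP_congr
        intro i _
        simp only [decide_eq_true_eq]
        constructor
        · rintro ⟨h1, h2⟩
          refine ⟨h1, ?_⟩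
          have : ((pc cs i : Nat) : Int) = ((2 * m : Nat) : Int) := by push_cast; omega
          exact_mod_cast this
        · rintro ⟨h1, h2⟩
          refine ⟨h1, ?_⟩
          rw [h2]
          push_cast
          ring
      rw [hw1, hw2]
      rw [cntN_eq_w_add_one cs m hm1 (by omega), cntN_eq_w_add_one cs (2 * m) (by omega) (by omega)]
      push_cast
      ring
  · rw [if_pos (by rw [hmod]; omega), if_pos (by rw [hmod]; omega)]
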